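-- pv_equiv track=rewrite | github.com/RamananVr/Leetcodepython | arrays/2732_find_a_good_subset_of_the_matrix.py | good_subset_of_binary_matrix_greedy
-- ===== SOURCE A (Python) =====
-- def good_subset_of_binary_matrix_greedy(grid: list[list[int]]) -> list[int]:
--     """
--     Greedy approach - try to find the largest good subset.
--
--     Args:
--         grid: Binary matrix
--
--     Returns:
--         list[int]: Indices of rows forming a good subset
--
--     Time Complexity: O(m^2 * n) - comparing all pairs of rows
--     Space Complexity: O(m) - storing result indices
--     """
--     m = len(grid)
--     used = [False] * m
--     result = []
--
--     for i in range(m):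
--         if used[i]:
--             continue
--
--         # Add current row to result
--         result.append(i)
--         used[i] = True
--
--         # Mark all identical rows as used
--         for j in range(i + 1, m):
--             if not used[j] and grid[i] == grid[j]:
--                 used[j] = True
--
--     return result
-- ===== SOURCE B (Python) =====
-- def good_subset_of_binary_matrix_greedy(grid: list[list[int]]) -> list[int]:
--     """One pass with a set of already-seen row contents: keep the index of each
--     row whose content has not appeared before."""
--     seen = set()
--     result = []
--     for i, row in enumerate(grid):
--         key = tuple(row)
--         if key not in seen:
--             seen.add(key)
--             result.append(i)
--     return result
-- ===== Notes on version B (the rewrite author's own statement) =====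
-- stated objective: alternative
-- what changed: Replaced the quadratic pairwise duplicate-marking with a used array by a single pass that keeps an index iff its row content is not in a set of previously seen rows, so the inner scan over later rows disappears.
import Mathlib
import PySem

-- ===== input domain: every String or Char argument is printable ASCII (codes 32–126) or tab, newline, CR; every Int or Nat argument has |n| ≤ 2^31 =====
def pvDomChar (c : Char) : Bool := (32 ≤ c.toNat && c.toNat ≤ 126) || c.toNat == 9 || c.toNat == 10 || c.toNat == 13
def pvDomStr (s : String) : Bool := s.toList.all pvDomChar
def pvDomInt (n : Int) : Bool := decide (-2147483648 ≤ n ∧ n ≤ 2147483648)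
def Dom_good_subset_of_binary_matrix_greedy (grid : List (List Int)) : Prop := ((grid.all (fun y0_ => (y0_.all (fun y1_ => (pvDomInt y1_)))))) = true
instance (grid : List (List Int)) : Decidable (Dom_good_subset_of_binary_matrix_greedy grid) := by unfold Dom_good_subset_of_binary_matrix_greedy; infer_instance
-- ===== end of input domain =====

-- B replaces A's pairwise duplicate-marking (a used array plus an inner scan over later rows)
-- by a single pass keeping each index whose row content is not in a set of previously seen rows.

-- ===== PORT A =====
-- inner loop: 'for j in range(i + 1, m): if not used[j] and grid[i] == grid[j]: used[j] = True'
-- (j is a valid nonnegative index throughout, so 'used[j] = True' is List.set at j.toNat)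
def pvInnerF (grid : List (List Int)) (i : Int) (u : List Bool) (j : Int) : List Bool :=
  if (!(PySem.List.pyGetD u j false)) &&
      (PySem.List.pyGetD grid i [] == PySem.List.pyGetD grid j []) then
    u.set j.toNat true
  else u

def pvInnerA (grid : List (List Int)) (i m : Int) (used : List Bool) : List Bool :=
  (PySem.List.pyRange (i + 1) m 1).foldl (pvInnerF grid i) used

-- one iteration of the outer 'for i in range(m)' loop over the state (used, result)
def pvStepA (grid : List (List Int)) (m : Int) (st : List Bool × List Int) (i : Int) :
    List Bool × List Int :=
  if PySem.List.pyGetD st.1 i false then st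
  else (pvInnerA grid i m ((st.1).set i.toNat true), st.2 ++ [i])

def good_subset_of_binary_matrix_greedy (grid : List (List Int)) : List Int :=
  ((PySem.List.pyRange 0 (grid.length : Int) 1).foldl
    (pvStepA grid (grid.length : Int)) (List.replicate grid.length false, [])).2

-- ===== PORT B =====
-- one iteration of 'for i, row in enumerate(grid)' over the state (seen, result)
def pvStepB (st : PySem.Set (List Int) × List Int) (p : Int × List Int) :
    PySem.Set (List Int) × List Int :=
  if PySem.Set.contains st.1 p.2 then st
  else (PySem.Set.add st.1 p.2, st.2 ++ [p.1])

def good_subset_of_binary_matrix_greedy_alt (grid : List (List Int)) : List Int :=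
  ((PySem.List.enumerate grid).foldl pvStepB (PySem.Set.empty, [])).2

-- ===== PRECONDITION & SPEC =====
def Spec_good_subset_of_binary_matrix_greedy (grid : List (List Int)) (out : List Int) : Prop := out = good_subset_of_binary_matrix_greedy_alt grid
instance (grid : List (List Int)) (out : List Int) : Decidable (Spec_good_subset_of_binary_matrix_greedy grid out) := by unfold Spec_good_subset_of_binary_matrix_greedy; infer_instance

-- ===== CLAIM (what is proved, stated in full; the proofs are below) =====
def Claim_equal_good_subset_of_binary_matrix_greedy : Prop := ∀ (grid : List (List Int)), Dom_good_subset_of_binary_matrix_greedy grid → Spec_good_subset_of_binary_matrix_greedy grid (good_subset_of_binary_matrix_greedy grid)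

-- ===== LEMMAS AND PROOFS =====

-- A's state after the first k outer iterations (indices fed as casts of 0..k-1)
def pvA (grid : List (List Int)) (k : Nat) : List Bool × List Int :=
  (List.range k).foldl (fun st (i : Nat) => pvStepA grid (grid.length : Int) st (i : Int))
    (List.replicate grid.length false, [])

-- B's state after the first k iterations
def pvB (grid : List (List Int)) (k : Nat) : PySem.Set (List Int) × List Int :=
  (List.range k).foldl (fun st (j : Nat) => pvStepB st ((j : Int), PySem.List.pyGetD grid (j : Int) []))
    (PySem.Set.empty, [])

lemma pvInnerF_length (grid : List (List Int)) (i : Int) (u : List Bool) (e : Int) :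
    (pvInnerF grid i u e).length = u.length := by
  unfold pvInnerF; split <;> simp

lemma pvInner_go_length (grid : List (List Int)) (i : Int) (l : List Int) (u : List Bool) :
    (l.foldl (pvInnerF grid i) u).length = u.length := by
  induction l generalizing u with
  | nil => rfl
  | cons x xs ih => simp only [List.foldl_cons]; rw [ih, pvInnerF_length]

lemma pvSetTrue_getD (u : List Bool) (k j : Nat) (hk : k < u.length) (hj : j < u.length) :
    (u.set k true).getD j false = (u.getD j false || decide (j = k)) := by
  have hj' : j < (u.set k true).length := by simpa using hj
  rw [List.getD_eq_getElem _ _ hj', List.getD_eq_getElem _ _ hj]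
  by_cases hjk : j = k
  · subst hjk
    simp [List.getElem_set_self hj']
  · rw [List.getElem_set_ne (fun h => hjk h.symm) hj']
    simp [hjk]

lemma pvInnerF_getD (grid : List (List Int)) (i : Int) (u : List Bool) (k : Nat)
    (hk : k < u.length) (j : Nat) (hj : j < u.length) :
    (pvInnerF grid i u ((k : Nat) : Int)).getD j false
    = (u.getD j false ||
        (decide (j = k) &&
          (PySem.List.pyGetD grid i [] == PySem.List.pyGetD grid (j : Int) []))) := by
  unfold pvInnerF
  simp only [PySem.List.pyGetD_natCast, Int.toNat_natCast]
  by_cases hjk : j = k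
  · subst hjk
    cases hu : u.getD j false
    · simp only [Bool.not_false, Bool.true_and, Bool.false_or, decide_true]
      cases hrow : (PySem.List.pyGetD grid i [] == grid.getD j [])
      · rw [if_neg (by simp)]
        exact hu
      · rw [if_pos rfl, pvSetTrue_getD u j j hj hj]
        simp
    · simp only [hu, Bool.not_true, Bool.false_and, Bool.false_eq_true, if_false,
        Bool.true_or]
  · cases hcond : (!u.getD k false && (PySem.List.pyGetD grid i [] == grid.getD k []))
    · rw [if_neg (by simp)]
      simp [hjk]
    · rw [if_pos rfl, pvSetTrue_getD u k j hk hj]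
      simp [hjk]

lemma pvInner_go_getD (grid : List (List Int)) (i : Int) (a b : Int) (u : List Bool)
    (ha : 0 ≤ a) (hb : b ≤ (u.length : Int)) (j : Nat) (hj : j < u.length) :
    ((PySem.List.pyRange a b 1).foldl (pvInnerF grid i) u).getD j false
    = (u.getD j false ||
        (decide (a ≤ (j : Int) ∧ (j : Int) < b) &&
          (PySem.List.pyGetD grid i [] == PySem.List.pyGetD grid (j : Int) []))) := by
  obtain ⟨n, hn⟩ : ∃ n : Nat, (b - a).toNat = n := ⟨_, rfl⟩
  induction n generalizing a u with
  | zero =>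
    have hba : b ≤ a := by omega
    rw [PySem.List.pyRange_one_eq_nil hba]
    have hnot : ¬ (a ≤ (j : Int) ∧ (j : Int) < b) := by omega
    simp [hnot]
  | succ n ih =>
    have hab : a < b := by omega
    obtain ⟨k, rfl⟩ : ∃ k : Nat, a = ((k : Nat) : Int) := ⟨a.toNat, by omega⟩
    have hk : k < u.length := by omega
    rw [PySem.List.pyRange_one_cons hab, List.foldl_cons]
    have hlen : (pvInnerF grid i u ((k : Nat) : Int)).length = u.length :=
      pvInnerF_length grid i u _
    rw [ih (((k : Nat) : Int) + 1) (pvInnerF grid i u ((k : Nat) : Int)) (by omega) (by omega)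
        (by omega) (by omega),
      pvInnerF_getD grid i u k hk j hj]
    by_cases hja : j = k
    · subst hja
      have h2 : ¬ (((j : Nat) : Int) + 1 ≤ (j : Int) ∧ (j : Int) < b) := by omega
      have h1 : (((j : Nat) : Int) ≤ (j : Int) ∧ (j : Int) < b) := by omega
      simp only [h1, decide_true, Bool.true_and]
      simp
    · have h3 : ((((k : Nat) : Int) + 1 ≤ (j : Int) ∧ (j : Int) < b)) ↔
          ((((k : Nat) : Int) ≤ (j : Int) ∧ (j : Int) < b)) := by omega
      have h4 : (k < j) = (k ≤ j) := propext (by omega)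
      simp [hja, h4]

lemma pvA_succ (grid : List (List Int)) (k : Nat) :
    pvA grid (k + 1) = pvStepA grid (grid.length : Int) (pvA grid k) (k : Int) := by
  unfold pvA
  rw [List.range_succ, List.foldl_append, List.foldl_cons, List.foldl_nil]

lemma pvB_succ (grid : List (List Int)) (k : Nat) :
    pvB grid (k + 1) = pvStepB (pvB grid k) ((k : Int), PySem.List.pyGetD grid (k : Int) []) := by
  unfold pvB
  rw [List.range_succ, List.foldl_append, List.foldl_cons, List.foldl_nil]

lemma pv_main (grid : List (List Int)) (k : Nat) (hk : k ≤ grid.length) :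
    (pvA grid k).2 = (pvB grid k).2 ∧
    (pvA grid k).1.length = grid.length ∧
    (∀ j, j < grid.length →
      ((pvA grid k).1.getD j false = true ↔ grid.getD j [] ∈ (pvB grid k).1)) ∧
    (∀ j, j < k → grid.getD j [] ∈ (pvB grid k).1) := by
  induction k with
  | zero =>
    refine ⟨rfl, by simp [pvA], ?_, fun j hj => absurd hj (by omega)⟩
    intro j hj
    simp [pvA, pvB, PySem.Set.empty]
  | succ k ih =>
    have hkm : k < grid.length := by omega
    obtain ⟨h2, hlen, hmem, hproc⟩ := ih (by omega)
    rw [pvA_succ, pvB_succ]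
    unfold pvStepA pvStepB
    simp only [PySem.List.pyGetD_natCast, Int.toNat_natCast]
    by_cases hc : (pvA grid k).1.getD k false = true
    · have hcB : PySem.Set.contains (pvB grid k).1 (grid.getD k []) = true := by
        rw [PySem.Set.contains_iff]
        exact (hmem k hkm).mp hc
      rw [if_pos hc, if_pos hcB]
      refine ⟨h2, hlen, hmem, fun j hj => ?_⟩
      rcases Nat.lt_succ_iff_lt_or_eq.mp hj with h | h
      · exact hproc j h
      · subst h
        exact (hmem j hkm).mp hc
    · have hcB : ¬ (PySem.Set.contains (pvB grid k).1 (grid.getD k []) = true) := by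
        rw [PySem.Set.contains_iff]
        intro hmm
        exact hc ((hmem k hkm).mpr hmm)
      rw [if_neg hc, if_neg hcB]
      have hsl : ((pvA grid k).1.set k true).length = grid.length := by
        rw [List.length_set, hlen]
      refine ⟨by rw [h2], ?_, ?_, ?_⟩
      · show (pvInnerA grid (k : Int) (grid.length : Int) ((pvA grid k).1.set k true)).length
            = grid.length
        unfold pvInnerA
        rw [pvInner_go_length, hsl]
      · intro j hj
        show (pvInnerA grid (k : Int) (grid.length : Int) ((pvA grid k).1.set k true)).getD j false
            = true ↔ _
        unfold pvInnerA
        rw [pvInner_go_getD grid (k : Int) ((k : Int) + 1) (grid.length : Int) _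
            (by omega) (by rw [hsl]) j (by rw [hsl]; exact hj),
          pvSetTrue_getD _ k j (hlen ▸ hkm) (hlen ▸ hj)]
        simp only [PySem.List.pyGetD_natCast, Bool.or_eq_true, decide_eq_true_eq,
          Bool.and_eq_true, beq_iff_eq, PySem.Set.mem_add]
        constructor
        · rintro ((h | h) | ⟨⟨hge, hlt⟩, heq⟩)
          · exact Or.inl ((hmem j hj).mp h)
          · subst h
            exact Or.inr rfl
          · exact Or.inr heq.symm
        · rintro (h | h)
          · exact Or.inl (Or.inl ((hmem j hj).mpr h))
          · by_cases hjk : j = k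
            · exact Or.inl (Or.inr hjk)
            · by_cases hlt : j < k
              · exact Or.inl (Or.inl ((hmem j hj).mpr (hproc j hlt)))
              · exact Or.inr ⟨⟨by omega, by omega⟩, h.symm⟩
      · intro j hj
        rw [PySem.Set.mem_add]
        rcases Nat.lt_succ_iff_lt_or_eq.mp hj with h | h
        · exact Or.inl (hproc j h)
        · subst h
          exact Or.inr rfl

-- ===== VERDICT (by name: the statement is the Claim_ definition above) =====
theorem good_subset_of_binary_matrix_greedy_spec : Claim_equal_good_subset_of_binary_matrix_greedy := by
  intro grid _
  unfold Spec_good_subset_of_binary_matrix_greedy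
  have hA : good_subset_of_binary_matrix_greedy grid = (pvA grid grid.length).2 := by
    unfold good_subset_of_binary_matrix_greedy pvA
    rw [PySem.List.pyRange_zero_natCast, List.foldl_map]
  have hB : good_subset_of_binary_matrix_greedy_alt grid = (pvB grid grid.length).2 := by
    unfold good_subset_of_binary_matrix_greedy_alt pvB
    rw [PySem.List.enumerate_eq_map_pyRange grid ([] : List Int)]
    have hlen : PySem.List.len grid = (grid.length : Int) := rfl
    rw [hlen, PySem.List.pyRange_zero_natCast, List.map_map, List.foldl_map]
    rfl
  rw [hA, hB, (pv_main grid grid.length le_rfl).1]
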